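-- pv_equiv track=rewrite | github.com/pypi-data/pypi-mirror-340 | packages/lpce/lpce-0.1.0-py3-none-any.whl/lpce/pdb_manipulations/split_bioml.py | get_header_footer
-- ===== SOURCE A (Python) =====
-- def get_header_footer(pdb_lines):
--     """
--     Extracts the header and footer sections from the PDB file.
--     """
--     header_lines = []
--     footer_lines = []
--     for line in pdb_lines:
--         if line.startswith("ATOM") or line.startswith("HETATM"):
--             break
--         header_lines.append(line)
--     for line in pdb_lines[::-1]:
--         if line.startswith("ATOM") or line.startswith("HETATM"):
--             break
--         footer_lines.insert(0, line)
--     return header_lines, footer_lines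
-- ===== SOURCE B (Python) =====
-- def get_header_footer(pdb_lines):
--     """
--     Extracts the header and footer sections from the PDB file.
--     """
--     atoms = [i for i, line in enumerate(pdb_lines)
--              if line.startswith("ATOM") or line.startswith("HETATM")]
--     if not atoms:
--         return list(pdb_lines), list(pdb_lines)
--     return pdb_lines[:atoms[0]], pdb_lines[atoms[-1] + 1:]
-- ===== Notes on version B (the rewrite author's own statement) =====
-- stated objective: simpler
-- what changed: Replaces A's two break-and-accumulate loops (a forward append loop and a loop over the reversed list using insert(0)) by computing the list of ATOM/HETATM indices once and returning two slices (before the first, after the last).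
import Mathlib
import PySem

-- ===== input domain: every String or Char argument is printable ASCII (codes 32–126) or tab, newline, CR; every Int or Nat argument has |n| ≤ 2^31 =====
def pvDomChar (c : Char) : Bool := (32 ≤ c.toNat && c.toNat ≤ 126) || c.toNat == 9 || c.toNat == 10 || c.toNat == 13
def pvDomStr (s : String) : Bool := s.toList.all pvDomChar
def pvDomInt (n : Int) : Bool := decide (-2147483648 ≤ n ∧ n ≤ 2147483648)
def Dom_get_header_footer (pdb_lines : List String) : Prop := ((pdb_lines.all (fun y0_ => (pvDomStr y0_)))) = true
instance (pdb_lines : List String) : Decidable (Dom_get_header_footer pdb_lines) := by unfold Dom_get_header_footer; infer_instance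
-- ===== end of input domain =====

-- B replaces A's two break-collect loops (forward append loop and reversed insert(0) loop)
-- by one index comprehension over enumerate plus two slices; objective: simpler.

-- ===== PORT A =====
def pvIsAtom (line : String) : Bool :=
  PySem.Str.startswith line "ATOM" || PySem.Str.startswith line "HETATM"

-- first loop: append each line to header_lines, break at the first ATOM/HETATM
def pvHeaderLoop : List String → List String
  | [] => []
  | line :: rest => if pvIsAtom line then [] else line :: pvHeaderLoop rest

-- second loop over pdb_lines[::-1]: footer_lines.insert(0, line), break at ATOM/HETATM
def pvFooterLoop : List String → List String → List String
  | [], acc => acc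
  | line :: rest, acc => if pvIsAtom line then acc else pvFooterLoop rest (line :: acc)

def get_header_footer (pdb_lines : List String) : List String × List String :=
  (pvHeaderLoop pdb_lines,
   pvFooterLoop ((PySem.List.slice? pdb_lines none none (-1)).getD []) [])

-- ===== PORT B =====
-- atoms = [i for i, line in enumerate(pdb_lines) if line.startswith("ATOM") or line.startswith("HETATM")]
def pvAtomIdxs (pdb_lines : List String) : List Int :=
  (PySem.List.enumerate pdb_lines).filterMap
    (fun p => if pvIsAtom p.2 then some p.1 else none)

def get_header_footer_alt (pdb_lines : List String) : List String × List String :=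
  match pvAtomIdxs pdb_lines with
  | [] => (pdb_lines, pdb_lines)
  | j :: rest =>
      (PySem.List.slice pdb_lines none (some j),
       PySem.List.slice pdb_lines (some ((j :: rest).getLast (by simp) + 1)) none)

-- ===== PRECONDITION & SPEC =====
def Spec_get_header_footer (pdb_lines : List String) (out : List String × List String) : Prop := out = get_header_footer_alt pdb_lines
instance (pdb_lines : List String) (out : List String × List String) : Decidable (Spec_get_header_footer pdb_lines out) := by unfold Spec_get_header_footer; infer_instance

-- ===== CLAIM (what is proved, stated in full; the proofs are below) =====
def Claim_equal_get_header_footer : Prop := ∀ (pdb_lines : List String), Dom_get_header_footer pdb_lines → Spec_get_header_footer pdb_lines (get_header_footer pdb_lines)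

-- ===== LEMMAS AND PROOFS =====

-- proof-side characterisation of pvAtomIdxs with a general enumerate start
def pvF : List String → Int → List Int
  | [], _ => []
  | x :: xs, s => (if pvIsAtom x then [s] else []) ++ pvF xs (s + 1)

theorem pvF_eq_filterMap : ∀ (l : List String) (s : Int),
    (PySem.List.enumerate l s).filterMap (fun p => if pvIsAtom p.2 then some p.1 else none) = pvF l s := by
  intro l
  induction l with
  | nil => intro s; rfl
  | cons x xs ih =>
      intro s
      simp only [PySem.List.enumerate_cons, List.filterMap_cons, pvF]
      by_cases h : pvIsAtom x <;> simp [h, ih]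

theorem pvAtomIdxs_eq (l : List String) : pvAtomIdxs l = pvF l 0 := by
  simpa [pvAtomIdxs] using pvF_eq_filterMap l 0

theorem mem_pvF : ∀ (l : List String) (s m : Int), m ∈ pvF l s → s ≤ m ∧ m < s + l.length := by
  intro l
  induction l with
  | nil => intro s m h; simp [pvF] at h
  | cons x xs ih =>
      intro s m h
      simp only [pvF, List.mem_append] at h
      rcases h with h | h
      · by_cases hx : pvIsAtom x <;> simp [hx] at h
        subst h
        refine ⟨le_refl _, ?_⟩
        simp only [List.length_cons]
        push_cast
        omega
      · have := ih (s + 1) m h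
        constructor <;> [omega; (simp; omega)]

theorem pvF_nil_notAtom : ∀ (l : List String) (s : Int), pvF l s = [] → ∀ x ∈ l, pvIsAtom x = false := by
  intro l
  induction l with
  | nil => intro s _ x hx; simp at hx
  | cons y ys ih =>
      intro s h x hx
      simp only [pvF] at h
      by_cases hy : pvIsAtom y
      · simp [hy] at h
      · simp [hy] at h
        rcases List.mem_cons.mp hx with rfl | hx
        · simpa using hy
        · exact ih (s + 1) h x hx

theorem pvHeaderLoop_eq_self : ∀ (l : List String), (∀ x ∈ l, pvIsAtom x = false) → pvHeaderLoop l = l := by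
  intro l
  induction l with
  | nil => intro _; rfl
  | cons x xs ih =>
      intro h
      have hx := h x (by simp)
      simp [pvHeaderLoop, hx, ih fun y hy => h y (by simp [hy])]

theorem pvHeaderLoop_take : ∀ (l : List String) (s j : Int) (rest : List Int),
    pvF l s = j :: rest → s ≤ j ∧ pvHeaderLoop l = l.take (j - s).toNat := by
  intro l
  induction l with
  | nil => intro s j rest h; simp [pvF] at h
  | cons x xs ih =>
      intro s j rest h
      simp only [pvF] at h
      by_cases hx : pvIsAtom x
      · simp [hx] at h
        obtain ⟨rfl, -⟩ := h
        refine ⟨le_refl _, ?_⟩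
        simp [pvHeaderLoop, hx]
      · simp [hx] at h
        obtain ⟨hle, htk⟩ := ih (s + 1) j rest h
        refine ⟨by omega, ?_⟩
        have hn : (j - s).toNat = (j - (s + 1)).toNat + 1 := by omega
        simp [pvHeaderLoop, hx, htk, hn]

theorem pvFooterLoop_acc : ∀ (r acc : List String), pvFooterLoop r acc = pvFooterLoop r [] ++ acc := by
  intro r
  induction r with
  | nil => intro acc; rfl
  | cons x xs ih =>
      intro acc
      by_cases hx : pvIsAtom x
      · simp [pvFooterLoop, hx]
      · simp only [pvFooterLoop, hx, if_false, Bool.false_eq_true]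
        rw [ih (x :: acc), ih [x]]
        simp

theorem pvF_append_singleton : ∀ (ys : List String) (x : String) (s : Int),
    pvF (ys ++ [x]) s = pvF ys s ++ (if pvIsAtom x then [s + ys.length] else []) := by
  intro ys
  induction ys with
  | nil => intro x s; by_cases hx : pvIsAtom x <;> simp [pvF, hx]
  | cons y ys ih =>
      intro x s
      simp only [List.cons_append, pvF, ih, List.append_assoc]
      by_cases hx : pvIsAtom x
      · simp [hx]
        omega
      · simp [hx]

theorem pvFooterLoop_spec : ∀ (l : List String) (s : Int),
    pvFooterLoop l.reverse [] =
      (match (pvF l s).getLast? with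
       | none => l
       | some m => l.drop (m - s + 1).toNat) := by
  intro l
  induction l using List.reverseRecOn with
  | nil => intro s; rfl
  | append_singleton ys x ih =>
      intro s
      rw [List.reverse_append]
      simp only [List.reverse_cons, List.reverse_nil, List.nil_append, List.cons_append,
        List.nil_append] at *
      rw [pvF_append_singleton]
      by_cases hx : pvIsAtom x
      · simp only [hx, if_true]
        rw [List.getLast?_concat]
        have : (s + (ys.length : Int) - s + 1).toNat = ys.length + 1 := by omega
        simp [pvFooterLoop, hx, List.drop_eq_nil_of_le]
      · simp only [hx, if_false, Bool.false_eq_true, List.append_nil]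
        have hloop : pvFooterLoop (x :: ys.reverse) [] = pvFooterLoop ys.reverse [] ++ [x] := by
          simp only [pvFooterLoop, hx, if_false, Bool.false_eq_true]
          exact pvFooterLoop_acc ys.reverse [x]
        rw [hloop, ih s]
        cases hlast : (pvF ys s).getLast? with
        | none => simp
        | some m =>
            have hm : m ∈ pvF ys s := List.mem_of_getLast? hlast
            obtain ⟨h1, h2⟩ := mem_pvF ys s m hm
            have hle : (m - s + 1).toNat ≤ ys.length := by omega
            simp [List.drop_append_of_le_length hle]

-- ===== VERDICT (by name: the statement is the Claim_ definition above) =====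
theorem get_header_footer_spec : Claim_equal_get_header_footer := by
  intro l _
  unfold Spec_get_header_footer
  have hA : get_header_footer l = (pvHeaderLoop l, pvFooterLoop l.reverse []) := by
    simp [get_header_footer, PySem.List.slice?_none_none_neg_one]
  rw [hA]
  cases h : pvAtomIdxs l with
  | nil =>
      have hF : pvF l 0 = [] := by rw [← pvAtomIdxs_eq, h]
      have hHdr := pvHeaderLoop_eq_self l (pvF_nil_notAtom l 0 hF)
      have hFtr := pvFooterLoop_spec l 0
      rw [hF] at hFtr
      simp only [List.getLast?_nil] at hFtr
      simp [get_header_footer_alt, h, hHdr, hFtr]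
  | cons j rest =>
      have hF : pvF l 0 = j :: rest := by rw [← pvAtomIdxs_eq, h]
      obtain ⟨hj0, hHdr⟩ := pvHeaderLoop_take l 0 j rest hF
      set m := (j :: rest).getLast (by simp) with hmdef
      have hlastF : (pvF l 0).getLast? = some m := by
        rw [hF, List.getLast?_eq_some_getLast]
      have hm : m ∈ pvF l 0 := List.mem_of_getLast? hlastF
      obtain ⟨hm0, -⟩ := mem_pvF l 0 m hm
      have hFtr := pvFooterLoop_spec l 0
      rw [hlastF] at hFtr
      simp only [get_header_footer_alt, h]
      rw [PySem.List.slice_to _ hj0, PySem.List.slice_from _ (by omega : (0:Int) ≤ m + 1)]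
      refine Prod.ext ?_ ?_
      · simpa using hHdr
      · have : (m - 0 + 1).toNat = (m + 1).toNat := by omega
        simpa [this] using hFtr
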